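-- pv_equiv track=rewrite | github.com/samplics-org/svy | packages/svy/src/svy/engine/wrangling/cleaning.py | _lower_rest_after_first_alpha
-- ===== SOURCE A (Python) =====
-- def _lower_rest_after_first_alpha(s: str) -> str:
--     """Lowercase alphabetic chars after the first alphabetic char."""
--     out = []
--     seen_alpha = False
--     for ch in s:
--         if ch.isalpha():
--             if not seen_alpha:
--                 out.append(ch)
--                 seen_alpha = True
--             else:
--                 out.append(ch.lower())
--         else:
--             out.append(ch)
--     return "".join(out)
-- ===== SOURCE B (Python) =====
-- def _lower_rest_after_first_alpha(s: str) -> str: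
--     """Lowercase alphabetic chars after the first alphabetic char."""
--     i = next((k for k, c in enumerate(s) if c.isalpha()), None)
--     if i is None:
--         return s
--     return s[:i + 1] + "".join(c.lower() for c in s[i + 1:])
-- ===== Notes on version B (the rewrite author's own statement) =====
-- stated objective: idiomatic
-- what changed: Replaces A's single pass with a boolean seen-flag accumulator by locating the first alphabetic character's index and returning the untouched prefix plus the per-character-lowercased suffix.
import Mathlib
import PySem

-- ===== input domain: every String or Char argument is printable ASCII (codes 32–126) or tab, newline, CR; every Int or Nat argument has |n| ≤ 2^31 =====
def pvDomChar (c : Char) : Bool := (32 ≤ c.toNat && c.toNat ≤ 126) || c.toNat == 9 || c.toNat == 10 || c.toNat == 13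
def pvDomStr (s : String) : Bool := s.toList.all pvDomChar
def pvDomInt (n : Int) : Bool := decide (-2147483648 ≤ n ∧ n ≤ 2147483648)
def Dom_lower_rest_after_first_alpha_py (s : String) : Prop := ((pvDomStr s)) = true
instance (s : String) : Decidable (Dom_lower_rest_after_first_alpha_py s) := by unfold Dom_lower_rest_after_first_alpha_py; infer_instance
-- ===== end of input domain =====

-- B replaces A's single pass with a seen_alpha flag by an index-of-first-alpha
-- split: prefix kept as-is, suffix lowercased per character (objective: idiomatic).


-- ===== PORT A =====
-- for ch in s: append ch / ch.lower() to out depending on seen_alpha; "".join(out)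
def lower_rest_after_first_alpha_py (s : String) : String :=
  let r := s.toList.foldl
    (fun (st : List Char × Bool) ch =>
      if PySem.Chars.isalpha ch then
        if !st.2 then (st.1 ++ [ch], true)
        else (st.1 ++ [PySem.Chars.lowerChar ch], st.2)
      else (st.1 ++ [ch], st.2))
    ([], false)
  String.ofList r.1

-- ===== PORT B =====
-- index of first alphabetic char; prefix unchanged, suffix lowercased char by char
def lower_rest_after_first_alpha_py_alt (s : String) : String :=
  match s.toList.findIdx? PySem.Chars.isalpha with
  | none => s
  | some i =>
      String.ofList (s.toList.take (i + 1) ++ (s.toList.drop (i + 1)).map PySem.Chars.lowerChar)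

-- ===== PRECONDITION & SPEC =====
def Spec_lower_rest_after_first_alpha_py (s : String) (out : String) : Prop := out = lower_rest_after_first_alpha_py_alt s
instance (s : String) (out : String) : Decidable (Spec_lower_rest_after_first_alpha_py s out) := by unfold Spec_lower_rest_after_first_alpha_py; infer_instance

-- ===== CLAIM (what is proved, stated in full; the proofs are below) =====
def Claim_equal_lower_rest_after_first_alpha_py : Prop := ∀ (s : String), Dom_lower_rest_after_first_alpha_py s → Spec_lower_rest_after_first_alpha_py s (lower_rest_after_first_alpha_py s)

-- ===== LEMMAS AND PROOFS =====

theorem pv_lowerChar_of_not_alpha (c : Char) (h : PySem.Chars.isalpha c = false) :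
    PySem.Chars.lowerChar c = c := by
  simp only [PySem.Chars.isalpha, Bool.or_eq_false_iff] at h
  simp [PySem.Chars.lowerChar, h.1]

-- A's loop body, named for the lemmas
def pvStep (st : List Char × Bool) (ch : Char) : List Char × Bool :=
  if PySem.Chars.isalpha ch then
    if !st.2 then (st.1 ++ [ch], true)
    else (st.1 ++ [PySem.Chars.lowerChar ch], st.2)
  else (st.1 ++ [ch], st.2)

-- once seen_alpha is true, the loop lowercases every remaining char
theorem pv_fold_seen (cs : List Char) : ∀ (out : List Char),
    cs.foldl pvStep (out, true) = (out ++ cs.map PySem.Chars.lowerChar, true) := by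
  induction cs with
  | nil => simp
  | cons c cs ih =>
      intro out
      by_cases h : PySem.Chars.isalpha c = true
      · simp [pvStep, h, ih]
      · simp only [Bool.not_eq_true] at h
        simp [pvStep, h, ih, pv_lowerChar_of_not_alpha c h]

-- the loop from seen_alpha = false computes B's split form
theorem pv_fold_unseen (cs : List Char) : ∀ (out : List Char),
    (cs.foldl pvStep (out, false)).1 =
      out ++ (match cs.findIdx? PySem.Chars.isalpha with
              | none => cs
              | some i => cs.take (i + 1) ++ (cs.drop (i + 1)).map PySem.Chars.lowerChar) := by
  induction cs with
  | nil => simp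
  | cons c cs ih =>
      intro out
      by_cases h : PySem.Chars.isalpha c = true
      · simp [pvStep, h, List.findIdx?_cons, pv_fold_seen]
      · simp only [Bool.not_eq_true] at h
        simp only [List.foldl_cons, pvStep, h, Bool.false_eq_true, if_false, Bool.not_false,
          if_true, List.findIdx?_cons, ih]
        cases hf : cs.findIdx? PySem.Chars.isalpha with
        | none => simp
        | some i => simp

-- ===== VERDICT (by name: the statement is the Claim_ definition above) =====
theorem lower_rest_after_first_alpha_py_spec : Claim_equal_lower_rest_after_first_alpha_py := by
  intro s _
  show lower_rest_after_first_alpha_py s = lower_rest_after_first_alpha_py_alt s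
  unfold lower_rest_after_first_alpha_py lower_rest_after_first_alpha_py_alt
  have h := pv_fold_unseen s.toList []
  simp only [List.nil_append] at h
  show String.ofList (s.toList.foldl pvStep ([], false)).1 = _
  rw [h]
  cases hf : s.toList.findIdx? PySem.Chars.isalpha with
  | none => simp
  | some i => simp
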